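-- pv_equiv track=rewrite | github.com/msft-mirror-aosp/platform.external.toolchain-utils | auto_delete_nightly_test_data.py | IsChromeOsTmpDeletionCandidate
-- ===== SOURCE A (Python) =====
-- def IsChromeOsTmpDeletionCandidate(file_name: str):
--     """Returns whether the given basename can be deleted from a chroot's /tmp."""
--     name_prefixes = (
--         "test_that_",
--         "cros-update",
--         "CrAU_temp_data",
--     )
--     if any(file_name.startswith(x) for x in name_prefixes):
--         return True
--     # Remove files that look like `tmpABCDEFGHI`.
--     return len(file_name) == 9 and file_name.startswith("tmp")
-- ===== SOURCE B (Python) =====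
-- # B: compile the acceptance rules once into a flat trie (DFA) transition table,
-- # then decide by a single state-machine scan of the string.
-- _PATTERNS = (
--     ("test_that_", None),
--     ("cros-update", None),
--     ("CrAU_temp_data", None),
--     ("tmp", 6),  # 'tmp' followed by exactly 6 more characters
-- )
--
--
-- def _compile(patterns):
--     trans = {}   # (state, char) -> next state
--     accept = {}  # accepting state -> None (any remainder) or required remaining length
--     states = 1
--     for pattern, tail in patterns:
--         state = 0
--         for ch in pattern:
--             key = (state, ch)
--             if key not in trans:
--                 trans[key] = states
--                 states += 1
--             state = trans[key]
--         accept[state] = tail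
--     return trans, accept
--
--
-- _TRANS, _ACCEPT = _compile(_PATTERNS)
--
--
-- def IsChromeOsTmpDeletionCandidate(file_name: str):
--     """Returns whether the given basename can be deleted from a chroot's /tmp."""
--     state = 0
--     remaining = len(file_name)
--     for ch in file_name:
--         if state in _ACCEPT:
--             tail = _ACCEPT[state]
--             if tail is None or remaining == tail:
--                 return True
--         nxt = _TRANS.get((state, ch))
--         if nxt is None:
--             return False
--         state = nxt
--         remaining -= 1
--     if state in _ACCEPT:
--         tail = _ACCEPT[state]
--         return tail is None or remaining == tail
--     return False
-- ===== Notes on version B (the rewrite author's own statement) =====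
-- stated objective: alternative
-- what changed: B compiles the three prefixes and the tmp-plus-6-chars rule into a flat trie/DFA transition table once and decides membership by a single state-machine scan of the string, instead of A's any()-over-prefixes plus a separate length check.
import Mathlib
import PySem

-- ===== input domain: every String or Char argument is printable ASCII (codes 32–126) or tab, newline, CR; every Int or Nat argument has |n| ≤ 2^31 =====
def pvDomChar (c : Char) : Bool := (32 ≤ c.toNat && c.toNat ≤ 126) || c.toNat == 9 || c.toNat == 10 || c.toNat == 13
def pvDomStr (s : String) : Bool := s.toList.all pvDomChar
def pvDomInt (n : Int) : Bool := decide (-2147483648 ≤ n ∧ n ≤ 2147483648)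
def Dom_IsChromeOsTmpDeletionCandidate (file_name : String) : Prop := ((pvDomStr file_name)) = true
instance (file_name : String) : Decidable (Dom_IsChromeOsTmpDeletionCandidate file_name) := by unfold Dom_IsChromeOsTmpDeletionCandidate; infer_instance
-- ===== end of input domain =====

/-
B compiles the four deletion rules into a flat trie/DFA transition table once and decides by a
single state-machine scan of the string, instead of A's any()-over-prefixes plus a length test;
alternative decomposition, same cost.
-/


-- ===== PORT A =====
def IsChromeOsTmpDeletionCandidate (file_name : String) : Bool :=
  if ["test_that_", "cros-update", "CrAU_temp_data"].any
      (fun x => PySem.Str.startswith file_name x) then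
    true
  else
    decide (PySem.Str.len file_name = 9) && PySem.Str.startswith file_name "tmp"

-- ===== PORT B =====
-- B: the rule patterns; a tail of `some n` means 'exactly n more characters after the pattern'.
def pvPatterns : List (String × Option Int) :=
  [("test_that_", none), ("cros-update", none), ("CrAU_temp_data", none), ("tmp", some 6)]

-- _compile: build the flat trie transition table (state, char) -> state and the accept table.
def pvCompile (patterns : List (String × Option Int)) :
    PySem.Dict (Int × Char) Int × PySem.Dict Int (Option Int) :=
  let res := patterns.foldl
    (fun (acc : PySem.Dict (Int × Char) Int × PySem.Dict Int (Option Int) × Int) pt =>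
      let (tr, accept, states) := acc
      let inner := pt.1.toList.foldl
        (fun (st : PySem.Dict (Int × Char) Int × Int × Int) ch =>
          let (tr, state, states) := st
          let key := (state, ch)
          let (tr, states) :=
            if tr.contains key then (tr, states)
            else (tr.insert key states, states + 1)
          -- state = trans[key]; the key is present, so the default is never used
          (tr, (tr.get? key).getD 0, states))
        (tr, (0 : Int), states)
      (inner.1, accept.insert inner.2.1 pt.2, inner.2.2))
    (PySem.Dict.empty, PySem.Dict.empty, (1 : Int))
  (res.1, res.2.1)

-- accept check done both inside the scan loop and after it
def pvAcceptCheck (accept : PySem.Dict Int (Option Int)) (state r : Int) : Bool :=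
  match accept.get? state with
  | some none => true
  | some (some t) => decide (r = t)
  | none => false

-- the scan loop: state, remaining length, remaining characters
def pvRun (trans : PySem.Dict (Int × Char) Int) (accept : PySem.Dict Int (Option Int)) :
    Int → Int → List Char → Bool
  | state, r, [] => pvAcceptCheck accept state r
  | state, r, ch :: rest =>
    if pvAcceptCheck accept state r then true
    else
      match trans.get? (state, ch) with
      | none => false
      | some nxt => pvRun trans accept nxt (r - 1) rest

def IsChromeOsTmpDeletionCandidate_alt (file_name : String) : Bool :=
  let c := pvCompile pvPatterns
  pvRun c.1 c.2 0 (PySem.Str.len file_name) file_name.toList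

-- ===== PRECONDITION & SPEC =====
def Spec_IsChromeOsTmpDeletionCandidate (file_name : String) (out : Bool) : Prop := out = IsChromeOsTmpDeletionCandidate_alt file_name
instance (file_name : String) (out : Bool) : Decidable (Spec_IsChromeOsTmpDeletionCandidate file_name out) := by unfold Spec_IsChromeOsTmpDeletionCandidate; infer_instance

-- ===== CLAIM (what is proved, stated in full; the proofs are below) =====
def Claim_equal_IsChromeOsTmpDeletionCandidate : Prop := ∀ (file_name : String), Dom_IsChromeOsTmpDeletionCandidate file_name → Spec_IsChromeOsTmpDeletionCandidate file_name (IsChromeOsTmpDeletionCandidate file_name)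

-- ===== LEMMAS AND PROOFS =====

-- the compiled tables, as literals
def pvT : PySem.Dict (Int × Char) Int := PySem.Dict.mk
  [((0, 't'), 1), ((1, 'e'), 2), ((2, 's'), 3), ((3, 't'), 4), ((4, '_'), 5), ((5, 't'), 6),
   ((6, 'h'), 7), ((7, 'a'), 8), ((8, 't'), 9), ((9, '_'), 10), ((0, 'c'), 11), ((11, 'r'), 12),
   ((12, 'o'), 13), ((13, 's'), 14), ((14, '-'), 15), ((15, 'u'), 16), ((16, 'p'), 17),
   ((17, 'd'), 18), ((18, 'a'), 19), ((19, 't'), 20), ((20, 'e'), 21), ((0, 'C'), 22),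
   ((22, 'r'), 23), ((23, 'A'), 24), ((24, 'U'), 25), ((25, '_'), 26), ((26, 't'), 27),
   ((27, 'e'), 28), ((28, 'm'), 29), ((29, 'p'), 30), ((30, '_'), 31), ((31, 'd'), 32),
   ((32, 'a'), 33), ((33, 't'), 34), ((34, 'a'), 35), ((1, 'm'), 36), ((36, 'p'), 37)]

def pvA : PySem.Dict Int (Option Int) := PySem.Dict.mk
  [(10, none), (21, none), (35, none), (37, some 6)]

lemma pvCompile_eq : pvCompile pvPatterns = (pvT, pvA) := by decide

-- a linear chain of unaccepting states st --cs--> f with no other way out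
def PvChain (T : PySem.Dict (Int × Char) Int) (Acc : PySem.Dict Int (Option Int)) :
    Int → List Char → Int → Prop
  | st, [], f => st = f
  | st, c :: cs, f => Acc.get? st = none ∧
      ∃ st', (∀ d, T.get? (st, d) = if c = d then some st' else none) ∧ PvChain T Acc st' cs f

lemma pvRun_chain {T : PySem.Dict (Int × Char) Int} {Acc : PySem.Dict Int (Option Int)}
    {cs : List Char} {st f : Int} (h : PvChain T Acc st cs f) :
    ∀ (l : List Char) (r : Int), pvRun T Acc st r l =
      if cs <+: l then pvRun T Acc f (r - cs.length) (l.drop cs.length) else false := by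
  induction cs generalizing st with
  | nil =>
    intro l r
    simp [PvChain] at h
    simp [h]
  | cons c cs ih =>
    intro l r
    obtain ⟨hacc, st', hstep, hrest⟩ := h
    cases l with
    | nil =>
      simp [pvRun, pvAcceptCheck, hacc]
    | cons a l =>
      by_cases hca : c = a
      · subst hca
        have hrun : pvRun T Acc st r (c :: l) = pvRun T Acc st' (r - 1) l := by
          simp [pvRun, pvAcceptCheck, hacc, hstep c]
        rw [hrun, ih hrest l (r - 1)]
        by_cases hpre : cs <+: l
        · simp only [hpre, if_true, List.cons_prefix_cons, true_and, List.length_cons,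
            List.drop_succ_cons]
          congr 1
          push_cast
          ring
        · have : ¬ (c :: cs <+: c :: l) := by
            simp [List.cons_prefix_cons, hpre]
          simp [hpre, this]
      · have : ¬ (c :: cs <+: a :: l) := by
          intro hp
          exact hca (List.cons_prefix_cons.mp hp).1
        simp [pvRun, pvAcceptCheck, hacc, hstep a, hca, this]

lemma pvRun_accept_any {T : PySem.Dict (Int × Char) Int} {Acc : PySem.Dict Int (Option Int)}
    {st : Int} (h : Acc.get? st = some none) :
    ∀ (l : List Char) (r : Int), pvRun T Acc st r l = true := by
  intro l r
  cases l <;> simp [pvRun, pvAcceptCheck, h]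

lemma pvRun_tail_state {T : PySem.Dict (Int × Char) Int} {Acc : PySem.Dict Int (Option Int)}
    {st t : Int} (h : Acc.get? st = some (some t))
    (hdead : ∀ d, T.get? (st, d) = none) :
    ∀ (l : List Char) (r : Int), pvRun T Acc st r l = decide (r = t) := by
  intro l r
  cases l with
  | nil => simp [pvRun, pvAcceptCheck, h]
  | cons a l =>
    simp only [pvRun, pvAcceptCheck, h, hdead a]
    split_ifs <;> simp_all

-- concrete edge facts
lemma pvT_step0 : ∀ d, pvT.get? (0, d) =
    if 't' = d then some 1 else if 'c' = d then some 11 else if 'C' = d then some 22 else none := by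
  (intro d; split_ifs with h <;> (first | (subst h; decide) | (simp [pvT, PySem.Dict.get?, Option.map_eq_none_iff, List.find?_eq_none, beq_iff_eq, Prod.mk.injEq]; aesop)))

lemma pvT_step1 : ∀ d, pvT.get? (1, d) =
    if 'e' = d then some 2 else if 'm' = d then some 36 else none := by
  (intro d; split_ifs with h <;> (first | (subst h; decide) | (simp [pvT, PySem.Dict.get?, Option.map_eq_none_iff, List.find?_eq_none, beq_iff_eq, Prod.mk.injEq]; aesop)))

lemma pvChain_test : PvChain pvT pvA 2 ['s', 't', '_', 't', 'h', 'a', 't', '_'] 10 := by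
  refine ⟨by decide, 3, ?_, by decide, 4, ?_, by decide, 5, ?_, by decide, 6, ?_, by decide, 7,
    ?_, by decide, 8, ?_, by decide, 9, ?_, by decide, 10, ?_, rfl⟩ <;>
    (intro d; split_ifs with h <;> (first | (subst h; decide) | (simp [pvT, PySem.Dict.get?, Option.map_eq_none_iff, List.find?_eq_none, beq_iff_eq, Prod.mk.injEq]; aesop)))

lemma pvChain_cros : PvChain pvT pvA 11 ['r', 'o', 's', '-', 'u', 'p', 'd', 'a', 't', 'e'] 21 := by
  refine ⟨by decide, 12, ?_, by decide, 13, ?_, by decide, 14, ?_, by decide, 15, ?_, by decide,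
    16, ?_, by decide, 17, ?_, by decide, 18, ?_, by decide, 19, ?_, by decide, 20, ?_,
    by decide, 21, ?_, rfl⟩ <;>
    (intro d; split_ifs with h <;> (first | (subst h; decide) | (simp [pvT, PySem.Dict.get?, Option.map_eq_none_iff, List.find?_eq_none, beq_iff_eq, Prod.mk.injEq]; aesop)))

lemma pvChain_CrAU : PvChain pvT pvA 22 ['r', 'A', 'U', '_', 't', 'e', 'm', 'p', '_', 'd', 'a', 't', 'a'] 35 := by
  refine ⟨by decide, 23, ?_, by decide, 24, ?_, by decide, 25, ?_, by decide, 26, ?_, by decide,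
    27, ?_, by decide, 28, ?_, by decide, 29, ?_, by decide, 30, ?_, by decide, 31, ?_,
    by decide, 32, ?_, by decide, 33, ?_, by decide, 34, ?_, by decide, 35, ?_, rfl⟩ <;>
    (intro d; split_ifs with h <;> (first | (subst h; decide) | (simp [pvT, PySem.Dict.get?, Option.map_eq_none_iff, List.find?_eq_none, beq_iff_eq, Prod.mk.injEq]; aesop)))

lemma pvChain_mp : PvChain pvT pvA 36 ['p'] 37 := by
  refine ⟨by decide, 37, ?_, rfl⟩
  (intro d; split_ifs with h <;> (first | (subst h; decide) | (simp [pvT, PySem.Dict.get?, beq_iff_eq, Prod.mk.injEq]; aesop)))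

lemma pvT_dead37 : ∀ d, pvT.get? (37, d) = none := by
  intro d
  simp [pvT, PySem.Dict.get?, beq_iff_eq, Prod.mk.injEq]

-- the scan from the start state decides exactly the four conditions
lemma pvRun_zero (l : List Char) (r : Int) :
    pvRun pvT pvA 0 r l =
      (decide (['t','e','s','t','_','t','h','a','t','_'] <+: l) ||
       decide (['c','r','o','s','-','u','p','d','a','t','e'] <+: l) ||
       decide (['C','r','A','U','_','t','e','m','p','_','d','a','t','a'] <+: l) ||
       (decide (['t','m','p'] <+: l) && decide (r = 9))) := by
  have h10 : pvA.get? 10 = some none := by decide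
  have h21 : pvA.get? 21 = some none := by decide
  have h35 : pvA.get? 35 = some none := by decide
  have h37 : pvA.get? 37 = some (some 6) := by decide
  have h0n : pvA.get? 0 = none := by decide
  have h1n : pvA.get? 1 = none := by decide
  cases l with
  | nil => simp [pvRun, pvAcceptCheck, h0n]
  | cons c l =>
    by_cases hct : c = 't'
    · subst hct
      have hrun1 : pvRun pvT pvA 0 r ('t' :: l) = pvRun pvT pvA 1 (r - 1) l := by
        simp [pvRun, pvAcceptCheck, h0n, pvT_step0 't']
      rw [hrun1]
      have hnc : ¬ (['c','r','o','s','-','u','p','d','a','t','e'] <+: 't' :: l) := by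
        intro hp; exact absurd (List.cons_prefix_cons.mp hp).1 (by decide)
      have hnC : ¬ (['C','r','A','U','_','t','e','m','p','_','d','a','t','a'] <+: 't' :: l) := by
        intro hp; exact absurd (List.cons_prefix_cons.mp hp).1 (by decide)
      cases l with
      | nil => simp [pvRun, pvAcceptCheck, h1n, hnc, hnC]
      | cons d l =>
        by_cases hde : d = 'e'
        · subst hde
          have hrun2 : pvRun pvT pvA 1 (r - 1) ('e' :: l) = pvRun pvT pvA 2 (r - 2) l := by
            simp [pvRun, pvAcceptCheck, h1n, pvT_step1 'e']
            congr 1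
            ring
          rw [hrun2, pvRun_chain pvChain_test l (r - 2)]
          have hnm : ¬ (['t','m','p'] <+: 't' :: 'e' :: l) := by
            intro hp
            exact absurd (List.cons_prefix_cons.mp (List.cons_prefix_cons.mp hp).2).1 (by decide)
          by_cases hpre : ['s','t','_','t','h','a','t','_'] <+: l
          · simp [hpre, pvRun_accept_any h10, List.cons_prefix_cons]
          · simp [hpre, hnc, hnC, hnm, List.cons_prefix_cons]
        · by_cases hdm : d = 'm'
          · subst hdm
            have hrun2 : pvRun pvT pvA 1 (r - 1) ('m' :: l) = pvRun pvT pvA 36 (r - 2) l := by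
              simp [pvRun, pvAcceptCheck, h1n, pvT_step1 'm']
              congr 1
              ring
            rw [hrun2, pvRun_chain pvChain_mp l (r - 2)]
            have hnt : ¬ (['t','e','s','t','_','t','h','a','t','_'] <+: 't' :: 'm' :: l) := by
              intro hp
              exact absurd (List.cons_prefix_cons.mp (List.cons_prefix_cons.mp hp).2).1 (by decide)
            by_cases hpre : ['p'] <+: l
            · rw [if_pos hpre, pvRun_tail_state h37 pvT_dead37]
              have : (r - 2 - 1 = 6) = (r = 9) := by
                apply propext; constructor <;> intro h <;> omega
              simp [hnt, hnc, hnC, List.cons_prefix_cons, hpre, this]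
            · simp [hpre, hnt, hnc, hnC, List.cons_prefix_cons]
          · -- dead after 't': second char is neither 'e' nor 'm'
            have hstep : pvT.get? (1, d) = none := by
              simp [pvT_step1 d, Ne.symm hde, Ne.symm hdm]
            have hnt : ¬ (['t','e','s','t','_','t','h','a','t','_'] <+: 't' :: d :: l) := by
              intro hp
              exact hde (List.cons_prefix_cons.mp (List.cons_prefix_cons.mp hp).2).1.symm
            have hnm : ¬ (['t','m','p'] <+: 't' :: d :: l) := by
              intro hp
              exact hdm (List.cons_prefix_cons.mp (List.cons_prefix_cons.mp hp).2).1.symm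
            simp [pvRun, pvAcceptCheck, h1n, hstep, hnt, hnm, hnc, hnC]
    · by_cases hcc : c = 'c'
      · subst hcc
        have hrun1 : pvRun pvT pvA 0 r ('c' :: l) = pvRun pvT pvA 11 (r - 1) l := by
          simp [pvRun, pvAcceptCheck, h0n, pvT_step0 'c']
        rw [hrun1, pvRun_chain pvChain_cros l (r - 1)]
        have hnt : ¬ (['t','e','s','t','_','t','h','a','t','_'] <+: 'c' :: l) := by
          intro hp; exact absurd (List.cons_prefix_cons.mp hp).1 (by decide)
        have hnm : ¬ (['t','m','p'] <+: 'c' :: l) := by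
          intro hp; exact absurd (List.cons_prefix_cons.mp hp).1 (by decide)
        have hnC : ¬ (['C','r','A','U','_','t','e','m','p','_','d','a','t','a'] <+: 'c' :: l) := by
          intro hp; exact absurd (List.cons_prefix_cons.mp hp).1 (by decide)
        by_cases hpre : ['r','o','s','-','u','p','d','a','t','e'] <+: l
        · simp [hpre, pvRun_accept_any h21, List.cons_prefix_cons]
        · simp [hpre, hnt, hnm, hnC, List.cons_prefix_cons]
      · by_cases hcC : c = 'C'
        · subst hcC
          have hrun1 : pvRun pvT pvA 0 r ('C' :: l) = pvRun pvT pvA 22 (r - 1) l := by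
            simp [pvRun, pvAcceptCheck, h0n, pvT_step0 'C']
          rw [hrun1, pvRun_chain pvChain_CrAU l (r - 1)]
          have hnt : ¬ (['t','e','s','t','_','t','h','a','t','_'] <+: 'C' :: l) := by
            intro hp; exact absurd (List.cons_prefix_cons.mp hp).1 (by decide)
          have hnm : ¬ (['t','m','p'] <+: 'C' :: l) := by
            intro hp; exact absurd (List.cons_prefix_cons.mp hp).1 (by decide)
          have hnc : ¬ (['c','r','o','s','-','u','p','d','a','t','e'] <+: 'C' :: l) := by
            intro hp; exact absurd (List.cons_prefix_cons.mp hp).1 (by decide)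
          by_cases hpre : ['r','A','U','_','t','e','m','p','_','d','a','t','a'] <+: l
          · simp [hpre, pvRun_accept_any h35, List.cons_prefix_cons]
          · simp [hpre, hnt, hnm, hnc, List.cons_prefix_cons]
        · -- dead at the start: first char not 't', 'c', 'C'
          have hstep : pvT.get? (0, c) = none := by
            simp [pvT_step0 c, Ne.symm hct, Ne.symm hcc, Ne.symm hcC]
          have h0n : pvA.get? 0 = none := by decide
          have hnt : ¬ (['t','e','s','t','_','t','h','a','t','_'] <+: c :: l) := by
            intro hp; exact hct (List.cons_prefix_cons.mp hp).1.symm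
          have hnm : ¬ (['t','m','p'] <+: c :: l) := by
            intro hp; exact hct (List.cons_prefix_cons.mp hp).1.symm
          have hnc : ¬ (['c','r','o','s','-','u','p','d','a','t','e'] <+: c :: l) := by
            intro hp; exact hcc (List.cons_prefix_cons.mp hp).1.symm
          have hnC : ¬ (['C','r','A','U','_','t','e','m','p','_','d','a','t','a'] <+: c :: l) := by
            intro hp; exact hcC (List.cons_prefix_cons.mp hp).1.symm
          simp [pvRun, pvAcceptCheck, h0n, hstep, hnt, hnm, hnc, hnC]

lemma startswith_eq_decide (s p : List Char) :
    PySem.Chars.startswith s p = decide (p <+: s) := by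
  by_cases hp : p <+: s
  · simp [PySem.Chars.startswith_iff, hp]
  · simp only [hp, decide_false]
    rw [Bool.eq_false_iff]
    intro hT
    exact hp ((PySem.Chars.startswith_iff _ _).mp hT)

-- ===== VERDICT (by name: the statement is the Claim_ definition above) =====
theorem IsChromeOsTmpDeletionCandidate_spec : Claim_equal_IsChromeOsTmpDeletionCandidate := by
  intro s _
  unfold Spec_IsChromeOsTmpDeletionCandidate IsChromeOsTmpDeletionCandidate
    IsChromeOsTmpDeletionCandidate_alt
  simp only [pvCompile_eq]
  rw [show (PySem.Str.len s) = (s.toList.length : Int) from by simp [PySem.Str.len_eq]]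
  rw [pvRun_zero]
  simp only [List.any_cons, List.any_nil, Bool.or_false, PySem.Str.startswith_eq,
    startswith_eq_decide]
  have h1 : "test_that_".toList = ['t','e','s','t','_','t','h','a','t','_'] := rfl
  have h2 : "cros-update".toList = ['c','r','o','s','-','u','p','d','a','t','e'] := rfl
  have h3 : "CrAU_temp_data".toList = ['C','r','A','U','_','t','e','m','p','_','d','a','t','a'] := rfl
  have h4 : "tmp".toList = ['t','m','p'] := rfl
  rw [h1, h2, h3, h4]
  by_cases p1 : ['t','e','s','t','_','t','h','a','t','_'] <+: s.toList <;>
    by_cases p2 : ['c','r','o','s','-','u','p','d','a','t','e'] <+: s.toList <;>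
      by_cases p3 : ['C','r','A','U','_','t','e','m','p','_','d','a','t','a'] <+: s.toList <;>
        by_cases p4 : ['t','m','p'] <+: s.toList <;>
          by_cases p5 : (s.toList.length : Int) = 9 <;>
            simp [p1, p2, p3, p4]
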